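-- pv_equiv track=rewrite | github.com/LuckyN510/CODE_PTIT | PYTHON/ICPC0114_PERFECT PRIME.py | check
-- ===== SOURCE A (Python) =====
-- import math
--
-- def isPrime(n):
--     if n < 2:
--         return False
--     for i in range(2, math.isqrt(n) + 1):
--         if n % i == 0:
--             return False
--     return True
--
-- def check(n):
--     if not isPrime(n):
--         return False
--     s = str(n)
--     if s != s[::-1]:
--         return False
--     tong = sum(int(i) for i in s)
--     if not isPrime(tong):
--         return False
--     if not all(isPrime(int(i)) for i in s):
--         return False
--     return True
-- ===== SOURCE B (Python) =====
-- import math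
--
-- def isPrime(n):
--     if n < 2:
--         return False
--     for i in range(2, math.isqrt(n) + 1):
--         if n % i == 0:
--             return False
--     return True
--
-- def check(n):
--     if not isPrime(n):
--         return False
--     m = n
--     total = 0
--     rev = 0
--     digits_prime = True
--     while m > 0:
--         d = m % 10
--         total += d
--         rev = rev * 10 + d
--         if not isPrime(d):
--             digits_prime = False
--         m //= 10
--     return rev == n and isPrime(total) and digits_prime
-- ===== Notes on version B (the rewrite author's own statement) =====
-- stated objective: alternative
-- what changed: Replaced A's string conversion, slice-reversal and per-character int() parsing by a single integer divmod loop that simultaneously accumulates the digit sum, a reversed integer (compared with n for the palindrome test) and an all-digits-prime flag.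
import Mathlib
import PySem

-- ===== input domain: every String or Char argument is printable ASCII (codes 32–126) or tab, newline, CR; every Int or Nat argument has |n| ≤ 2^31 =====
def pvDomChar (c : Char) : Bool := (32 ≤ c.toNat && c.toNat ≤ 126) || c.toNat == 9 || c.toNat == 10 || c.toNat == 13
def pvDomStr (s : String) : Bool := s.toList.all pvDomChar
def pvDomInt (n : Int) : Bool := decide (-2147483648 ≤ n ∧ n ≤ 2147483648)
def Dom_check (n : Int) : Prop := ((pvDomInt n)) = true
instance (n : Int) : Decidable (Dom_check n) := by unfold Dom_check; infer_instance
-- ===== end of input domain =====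

-- B replaces A's string-based digit handling (str, slice reversal, per-char int())
-- by one integer divmod loop building the digit sum, a reversed integer and an
-- all-digits-prime flag; same cost, no string conversions.

-- ===== PORT A =====
-- shared helper: Python's isPrime, used verbatim by both A and B
def isPrime (n : Int) : Bool :=
  if n < 2 then false
  else (PySem.List.pyRange 2 ((n.toNat.sqrt : Int) + 1) 1).all
        (fun i => !(PySem.Int.mod n i == 0))

def check (n : Int) : Bool :=
  if !isPrime n then false
  else
    let s := PySem.Int.toChars n            -- s = str(n)
    if s ≠ s.reverse then false             -- s[::-1] (slice with step -1) is reversal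
    else
      -- int(i) for a digit char: here n ≥ 2 so s is all digits and ofChars? is never none
      let tong := (s.map (fun c => (PySem.Int.ofChars? [c]).getD 0)).sum
      if !isPrime tong then false
      else if !(s.all (fun c => isPrime ((PySem.Int.ofChars? [c]).getD 0))) then false
      else true

-- ===== PORT B =====
-- the while-loop of Source B: state (m, total, rev, digits_prime)
def checkLoop (m total rev : Int) (ok : Bool) : Int × Int × Bool :=
  if h : 0 < m then
    let d := PySem.Int.mod m 10
    checkLoop (PySem.Int.floordiv m 10) (total + d) (rev * 10 + d) (ok && isPrime d)
  else (total, rev, ok)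
termination_by m.toNat
decreasing_by
  rw [PySem.Int.floordiv_eq_ediv_of_pos (by norm_num)]
  omega

def check_alt (n : Int) : Bool :=
  if !isPrime n then false
  else
    let r := checkLoop n 0 0 true
    (r.2.1 == n) && isPrime r.1 && r.2.2

-- ===== PRECONDITION & SPEC =====
def Spec_check (n : Int) (out : Bool) : Prop := out = check_alt n
instance (n : Int) (out : Bool) : Decidable (Spec_check n out) := by unfold Spec_check; infer_instance

-- ===== CLAIM (what is proved, stated in full; the proofs are below) =====
def Claim_equal_check : Prop := ∀ (n : Int), Dom_check n → Spec_check n (check n)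

-- ===== LEMMAS AND PROOFS =====

theorem isPrime_two_le {n : Int} (h : isPrime n = true) : 2 ≤ n := by
  by_contra hlt
  simp [isPrime, show n < 2 by omega] at h

theorem ofChars?_digitChar (d : Nat) (hd : d < 10) :
    PySem.Int.ofChars? [Nat.digitChar d] = some (d : Int) := by
  interval_cases d <;> decide

theorem toDigitsCore_eq (n : Nat) : ∀ (fuel : Nat) (ds : List Char), n < fuel → 0 < n →
    Nat.toDigitsCore 10 fuel n ds = ((Nat.digits 10 n).map Nat.digitChar).reverse ++ ds := by
  induction n using Nat.strong_induction_on with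
  | _ n ih =>
    intro fuel ds hfuel hn
    match fuel with
    | 0 => omega
    | f + 1 =>
      rw [Nat.toDigitsCore]
      rw [Nat.digits_def' (by norm_num) hn]
      by_cases h0 : n / 10 = 0
      · have h10 : n < 10 := by omega
        simp [h0]
      · have hlt : n / 10 < n := Nat.div_lt_self hn (by norm_num)
        simp only [h0, if_false]
        rw [ih (n / 10) hlt f _ (by omega) (by omega)]
        simp

theorem toChars_pos (m : Nat) (hm : 0 < m) :
    PySem.Int.toChars (m : Int) = ((Nat.digits 10 m).map Nat.digitChar).reverse := by
  have : ¬ ((m : Int) < 0) := by omega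
  simp only [PySem.Int.toChars, this, if_false, Int.toNat_natCast]
  rw [Nat.toDigits, toDigitsCore_eq m (m + 1) [] (by omega) hm, List.append_nil]

theorem map_digitChar_inj {l₁ l₂ : List Nat} (h₁ : ∀ d ∈ l₁, d < 10) (h₂ : ∀ d ∈ l₂, d < 10)
    (h : l₁.map Nat.digitChar = l₂.map Nat.digitChar) : l₁ = l₂ := by
  have key : ∀ l : List Nat, (∀ d ∈ l, d < 10) →
      (l.map Nat.digitChar).map (fun c => c.toNat - 48) = l := by
    intro l hl
    rw [List.map_map]
    apply List.map_congr_left ?_ |>.trans l.map_id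
    intro d hd
    have : d < 10 := hl d hd
    interval_cases d <;> rfl
  calc l₁ = (l₁.map Nat.digitChar).map (fun c => c.toNat - 48) := (key l₁ h₁).symm
    _ = (l₂.map Nat.digitChar).map (fun c => c.toNat - 48) := by rw [h]
    _ = l₂ := key l₂ h₂

theorem checkLoop_spec (m : Nat) : ∀ (total rev : Int) (ok : Bool),
    checkLoop (m : Int) total rev ok =
      (total + ((Nat.digits 10 m).map (fun (d : Nat) => (d : Int))).sum,
       rev * 10 ^ (Nat.digits 10 m).length + ((Nat.ofDigits 10 (Nat.digits 10 m).reverse : Nat) : Int),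
       ok && (Nat.digits 10 m).all (fun (d : Nat) => isPrime (d : Int))) := by
  induction m using Nat.strong_induction_on with
  | _ m ih =>
    intro total rev ok
    rw [checkLoop]
    by_cases hm : 0 < m
    · have hcast : (0 : Int) < (m : Int) := by exact_mod_cast hm
      simp only [hcast, dif_pos]
      rw [show PySem.Int.mod (m : Int) 10 = ((m % 10 : Nat) : Int) from PySem.Int.mod_natCast m 10,
          show PySem.Int.floordiv (m : Int) 10 = ((m / 10 : Nat) : Int) from PySem.Int.floordiv_natCast m 10]
      rw [ih (m / 10) (Nat.div_lt_self hm (by norm_num))]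
      rw [Nat.digits_def' (by norm_num) hm]
      refine Prod.ext ?_ (Prod.ext ?_ ?_)
      · simp; ring
      · simp only [List.reverse_cons, List.length_cons]
        rw [Nat.ofDigits_append]
        simp [Nat.ofDigits_singleton]
        push_cast
        ring
      · simp [Bool.and_assoc]
    · have hm0 : m = 0 := by omega
      subst hm0
      simp

theorem mod10_ne_zero_of_prime {m : Nat} (hp : isPrime (m : Int) = true) : m % 10 ≠ 0 := by
  intro h0
  have h2 : 2 ≤ m := by exact_mod_cast isPrime_two_le hp
  have h10 : 10 ≤ m := by omega
  have hsqrt : 2 ≤ Nat.sqrt m := by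
    rw [Nat.le_sqrt]; omega
  have hmem : (2 : Int) ∈ PySem.List.pyRange 2 (((m : Int).toNat.sqrt : Int) + 1) 1 := by
    rw [PySem.List.mem_pyRange_one]
    constructor
    · omega
    · simp only [Int.toNat_natCast]
      omega
  simp only [isPrime, show ¬((m : Int) < 2) by omega, if_false, List.all_eq_true] at hp
  have := hp 2 hmem
  rw [show PySem.Int.mod (m : Int) 2 = ((m % 2 : Nat) : Int) from PySem.Int.mod_natCast m 2] at this
  have : m % 2 ≠ 0 := by
    intro h; simp [h] at this
  omega

theorem rev_eq_iff_palindrome {m : Nat} (hp : isPrime (m : Int) = true) :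
    (Nat.ofDigits 10 (Nat.digits 10 m).reverse = m) ↔
      (Nat.digits 10 m) = (Nat.digits 10 m).reverse := by
  have h2 : 2 ≤ m := by exact_mod_cast isPrime_two_le hp
  have hne : Nat.digits 10 m ≠ [] := Nat.digits_ne_nil_iff_ne_zero.mpr (by omega)
  constructor
  · intro h
    have hlt : ∀ l ∈ (Nat.digits 10 m).reverse, l < 10 := by
      intro l hl
      exact Nat.digits_lt_base (by norm_num) (List.mem_reverse.mp hl)
    have hlast? : ((Nat.digits 10 m).reverse).getLast? = some (m % 10) := by
      rw [List.getLast?_reverse, Nat.digits_def' (by norm_num) (show 0 < m by omega)]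
      rfl
    have hlast : ∀ (hr : (Nat.digits 10 m).reverse ≠ []),
        ((Nat.digits 10 m).reverse).getLast hr ≠ 0 := by
      intro hr
      have hg := List.getLast?_eq_some_getLast (l := (Nat.digits 10 m).reverse) hr
      rw [hlast?] at hg
      rw [← Option.some_inj.mp hg]
      exact mod10_ne_zero_of_prime hp
    have := Nat.digits_ofDigits 10 (by norm_num) _ hlt hlast
    rw [h] at this
    exact this
  · intro h
    rw [← h, Nat.ofDigits_digits]

-- A's branch structure, in terms of the little-endian digit list
theorem check_eq (m : Nat) (hp : isPrime (m : Int) = true) :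
    check (m : Int) =
      (decide ((Nat.digits 10 m) = (Nat.digits 10 m).reverse)
       && isPrime (((Nat.digits 10 m).map (fun (d : Nat) => (d : Int))).sum)
       && (Nat.digits 10 m).all (fun (d : Nat) => isPrime ((d : Int)))) := by
  have h2 : 2 ≤ m := by exact_mod_cast isPrime_two_le hp
  have hdlt : ∀ d ∈ Nat.digits 10 m, d < 10 := fun d hd => Nat.digits_lt_base (by norm_num) hd
  unfold check
  rw [hp]
  simp only [Bool.not_true, Bool.false_eq_true, if_false]
  rw [toChars_pos m (by omega)]
  have hpal' : (((Nat.digits 10 m).map Nat.digitChar).reverse ≠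
      ((Nat.digits 10 m).map Nat.digitChar).reverse.reverse) ↔
      ¬ ((Nat.digits 10 m) = (Nat.digits 10 m).reverse) := by
    rw [List.reverse_reverse]
    constructor
    · intro h hL
      apply h
      conv_rhs => rw [hL]
      rw [← List.map_reverse]
    · intro h hC
      apply h
      rw [← List.map_reverse] at hC
      exact (map_digitChar_inj (fun d hd => hdlt d (List.mem_reverse.mp hd)) hdlt hC).symm
  have hsum : ((((Nat.digits 10 m).map Nat.digitChar).reverse).map
      (fun c => (PySem.Int.ofChars? [c]).getD 0)).sum =
      (((Nat.digits 10 m).map (fun (d : Nat) => (d : Int))).sum) := by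
    rw [List.map_reverse, List.sum_reverse, List.map_map]
    congr 1
    apply List.map_congr_left
    intro d hd
    simp [Function.comp, ofChars?_digitChar d (hdlt d hd)]
  have hall : (((Nat.digits 10 m).map Nat.digitChar).reverse).all
      (fun c => isPrime ((PySem.Int.ofChars? [c]).getD 0)) =
      (Nat.digits 10 m).all (fun (d : Nat) => isPrime ((d : Int))) := by
    rw [List.all_reverse, List.all_map]
    apply Bool.eq_iff_iff.mpr
    simp only [List.all_eq_true]
    refine ⟨fun h d hd => ?_, fun h d hd => ?_⟩
    · simpa [ofChars?_digitChar d (hdlt d hd)] using h d hd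
    · simp only [Function.comp_apply, ofChars?_digitChar d (hdlt d hd), Option.getD_some]
      exact h d hd
  by_cases hpald : (Nat.digits 10 m) = (Nat.digits 10 m).reverse
  · rw [if_neg (by rw [hpal']; exact fun h => h hpald), hsum, hall,
        decide_eq_true hpald, Bool.true_and]
    cases hS : isPrime (((Nat.digits 10 m).map (fun (d : Nat) => (d : Int))).sum) <;>
      cases hA : (Nat.digits 10 m).all (fun (d : Nat) => isPrime ((d : Int))) <;> simp
  · rw [if_pos (hpal'.mpr hpald), decide_eq_false hpald, Bool.false_and, Bool.false_and]

-- B's loop result, in terms of the same digit list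
theorem check_alt_eq (m : Nat) (hp : isPrime (m : Int) = true) :
    check_alt (m : Int) =
      (decide (Nat.ofDigits 10 (Nat.digits 10 m).reverse = m)
       && isPrime (((Nat.digits 10 m).map (fun (d : Nat) => (d : Int))).sum)
       && (Nat.digits 10 m).all (fun (d : Nat) => isPrime ((d : Int)))) := by
  unfold check_alt
  rw [hp]
  simp only [Bool.not_true, Bool.false_eq_true, if_false]
  rw [checkLoop_spec m 0 0 true]
  simp only [zero_add, zero_mul, Bool.true_and]
  rw [Bool.beq_eq_decide_eq, decide_eq_decide.mpr Nat.cast_inj]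

theorem check_spec : Claim_equal_check := by
  intro n _
  unfold Spec_check
  by_cases hp : isPrime n = true
  · have h2 : 2 ≤ n := isPrime_two_le hp
    obtain ⟨m, rfl⟩ : ∃ m : Nat, n = (m : Int) := ⟨n.toNat, (Int.toNat_of_nonneg (by omega)).symm⟩
    rw [check_eq m hp, check_alt_eq m hp,
        decide_eq_decide.mpr ((rev_eq_iff_palindrome hp).symm)]
  · simp only [Bool.not_eq_true] at hp
    simp [check, check_alt, hp]
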